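-- pv_equiv track=rewrite | github.com/QuangPhung15/CompetitiveProgramming | codeforce/800/Make it White.py | solve
-- ===== SOURCE A (Python) =====
-- def solve(n, s):
-- 	l, r = 0, n - 1
--
-- 	for i in range(n):
-- 		if (s[i] == "B"):
-- 			l = i
-- 			break
--
-- 	for i in range(n - 1, -1, -1):
-- 		if (s[i] == "B"):
-- 			r = i
-- 			break
--
-- 	return r - l + 1
-- ===== SOURCE B (Python) =====
-- def solve(n, s):
--     pos = [i for i in range(n) if s[i] == "B"]
--     return pos[-1] - pos[0] + 1 if pos else n
-- ===== Notes on version B (the rewrite author's own statement) =====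
-- stated objective: simpler
-- what changed: Replaces A's two endpoint-anchored break-loops (forward scan for the first 'B', backward scan for the last) with one forward pass that materializes the list of all 'B' positions via a comprehension and reads off its first and last element, falling back to n when there is none.
import Mathlib
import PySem

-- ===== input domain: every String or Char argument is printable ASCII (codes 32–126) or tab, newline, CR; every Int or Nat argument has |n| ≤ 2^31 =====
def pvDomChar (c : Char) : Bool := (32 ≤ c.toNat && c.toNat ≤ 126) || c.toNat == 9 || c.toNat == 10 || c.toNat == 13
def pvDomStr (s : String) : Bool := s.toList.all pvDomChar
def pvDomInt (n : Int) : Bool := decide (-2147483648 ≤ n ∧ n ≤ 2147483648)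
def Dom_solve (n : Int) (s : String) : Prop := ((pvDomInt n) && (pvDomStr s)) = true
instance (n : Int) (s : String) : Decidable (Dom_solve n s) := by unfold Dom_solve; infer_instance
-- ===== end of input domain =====

-- B replaces A's two break-loops (forward for the first 'B', backward for the last) with one
-- forward pass collecting all 'B' positions and reading off its first and last element.

-- ===== PORT A =====
-- the 'for i in range(…): if s[i] == "B": … = i; break' loop: first index in the list
-- whose character is 'B', else the default
def solveFind (s : String) : List Int → Int → Int
  | [], d => d
  | i :: t, d => if PySem.Str.pyGet? s i = some 'B' then i else solveFind s t d

def solve (n : Int) (s : String) : Int :=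
  let l := solveFind s (PySem.List.pyRange 0 n 1) 0
  let r := solveFind s (PySem.List.pyRange (n - 1) (-1) (-1)) (n - 1)
  r - l + 1

-- ===== PORT B =====
def solve_alt (n : Int) (s : String) : Int :=
  let pos := (PySem.List.pyRange 0 n 1).filter (fun i => PySem.Str.pyGet? s i = some 'B')
  match pos with
  | [] => n
  | h :: t => (h :: t).getLast (by simp) - h + 1

-- ===== PRECONDITION & SPEC =====
-- Pre_ excludes exactly the inputs where Python A raises IndexError: n beyond the string length
-- (negative n is fine: both ranges are empty and A returns n).
def Pre_solve (n : Int) (s : String) : Prop := n ≤ (s.length : Int)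
instance (n : Int) (s : String) : Decidable (Pre_solve n s) := by unfold Pre_solve; infer_instance
def pvWitness_solve : Int × String := (4, "WBBW")

def Spec_solve (n : Int) (s : String) (out : Int) : Prop := out = solve_alt n s
instance (n : Int) (s : String) (out : Int) : Decidable (Spec_solve n s out) := by unfold Spec_solve; infer_instance

-- ===== CLAIM (what is proved, stated in full; the proofs are below) =====
def Claim_equal_solve : Prop := ∀ (n : Int) (s : String), Dom_solve n s → Pre_solve n s → Spec_solve n s (solve n s)

-- ===== LEMMAS AND PROOFS =====
theorem solveFind_eq_headD (s : String) (L : List Int) (d : Int) :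
    solveFind s L d = (L.filter (fun i => PySem.Str.pyGet? s i = some 'B')).headD d := by
  induction L with
  | nil => rfl
  | cons i t ih =>
    by_cases h : PySem.List.pyGet? s.toList i = some 'B'
    · simp [solveFind, List.filter_cons, h]
    · simp [solveFind, List.filter_cons, h, ih]

theorem solveFind_reverse_eq_getLastD (s : String) (L : List Int) (d : Int) :
    solveFind s L.reverse d = (L.filter (fun i => PySem.Str.pyGet? s i = some 'B')).getLastD d := by
  rw [solveFind_eq_headD, List.filter_reverse]
  cases h : L.filter (fun i => PySem.Str.pyGet? s i = some 'B') with
  | nil => simp [h]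
  | cons a t => simp [List.getLast?_cons, List.getLastD_eq_getLast?]

-- ===== VERDICT (by name: the statement is the Claim_ definition above) =====
theorem solve_spec : Claim_equal_solve := by
  intro n s _ _
  unfold Spec_solve solve solve_alt
  have hrev : PySem.List.pyRange (n - 1) (-1) (-1) = (PySem.List.pyRange 0 n 1).reverse := by
    rw [PySem.List.pyRange_neg_one_eq_reverse]
    norm_num
  rw [hrev, solveFind_reverse_eq_getLastD, solveFind_eq_headD]
  cases h : (PySem.List.pyRange 0 n 1).filter (fun i => PySem.Str.pyGet? s i = some 'B') with
  | nil =>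
    simp only [h, List.getLastD_nil, List.headD_nil]
    ring
  | cons a t =>
    simp [h, List.getLastD_cons, List.getLastD_eq_getLast?, List.getLast?_eq_getLast]
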